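-- pv_equiv track=rewrite | github.com/AmirTlinov/apply_task | core/desktop/devtools/application/plan_sanitizer.py | _normalize_doc
-- ===== SOURCE A (Python) =====
-- from typing import Any, Dict, List, Optional, Tuple
--
-- def _normalize_doc(lines: List[str]) -> str:
--     # Trim right whitespace; keep internal indentation where present.
--     raw_lines = [str(l or "").rstrip() for l in lines]
--     # Drop leading/trailing blank lines.
--     while raw_lines and not raw_lines[0].strip():
--         raw_lines.pop(0)
--     while raw_lines and not raw_lines[-1].strip():
--         raw_lines.pop()
--     # Collapse excessive blank runs (3+ -> 2).
--     out: List[str] = []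
--     blank_run = 0
--     for line in raw_lines:
--         if not line.strip():
--             blank_run += 1
--             if blank_run <= 2:
--                 out.append("")
--             continue
--         blank_run = 0
--         out.append(line)
--     return "\n".join(out).strip()
-- ===== SOURCE B (Python) =====
-- def _normalize_doc(lines):
--     # Single run-length pass over the rstripped lines: non-blank runs are kept
--     # verbatim, each blank run is emitted as at most two empty lines, and the
--     # final .strip() of the joined text erases boundary blank lines, so no
--     # separate leading/trailing trimming is needed.
--     raw = [str(l or "").rstrip() for l in lines]
--     out = []
--     i = 0
--     n = len(raw)
--     while i < n:
--         j = i
--         if raw[i].strip():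
--             while j < n and raw[j].strip():
--                 j += 1
--             out.extend(raw[i:j])
--         else:
--             while j < n and not raw[j].strip():
--                 j += 1
--             out.extend([""] * min(j - i, 2))
--         i = j
--     return "\n".join(out).strip()
-- ===== Notes on version B (the rewrite author's own statement) =====
-- stated objective: idiomatic
-- what changed: Replaced A's pop-based leading/trailing blank trimming plus a running blank-run counter with a single run-length scan that emits non-blank runs verbatim and at most two empty lines per blank run, relying on the final strip() to erase boundary blanks.
import Mathlib
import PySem

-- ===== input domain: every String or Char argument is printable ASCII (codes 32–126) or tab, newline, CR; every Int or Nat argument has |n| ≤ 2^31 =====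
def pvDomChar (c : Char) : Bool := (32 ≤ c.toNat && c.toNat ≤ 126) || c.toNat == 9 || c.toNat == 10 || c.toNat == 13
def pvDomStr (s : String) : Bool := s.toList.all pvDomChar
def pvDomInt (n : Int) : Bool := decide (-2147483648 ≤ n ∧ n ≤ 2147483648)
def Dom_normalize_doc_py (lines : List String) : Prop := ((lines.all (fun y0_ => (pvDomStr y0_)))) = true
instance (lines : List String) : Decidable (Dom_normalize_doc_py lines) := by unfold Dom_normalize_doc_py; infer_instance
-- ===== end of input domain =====

-- B replaces A's trim-then-count pipeline by one run-length pass capped at two blanks per run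
-- (objective: idiomatic; same cost). Proven equal to A on every input.

-- ===== PORT A =====

-- `not line.strip()` truthiness: a line is blank iff its strip() is empty
def pvBlank (s : String) : Bool := PySem.Str.strip s == ""

-- `while raw_lines and not raw_lines[0].strip(): raw_lines.pop(0)`
def pvTrimLead : List String → List String
  | [] => []
  | x :: xs => if pvBlank x then pvTrimLead xs else x :: xs

-- `while raw_lines and not raw_lines[-1].strip(): raw_lines.pop()` = the same loop on the reverse
def pvTrimTrail (xs : List String) : List String := (pvTrimLead xs.reverse).reverse

-- the `for line in raw_lines` loop carrying (out, blank_run)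
def pvLoopA : List String → Int → List String → List String
  | out, _, [] => out
  | out, blank_run, line :: rest =>
    if pvBlank line then
      pvLoopA (if blank_run + 1 ≤ 2 then out ++ [""] else out) (blank_run + 1) rest
    else
      pvLoopA (out ++ [line]) 0 rest

def normalize_doc_py (lines : List String) : String :=
  -- raw_lines = [str(l or "").rstrip() for l in lines]  (`l or ""` is l for a str, "" when empty)
  let raw := lines.map (fun l => PySem.Str.rstrip (if l == "" then "" else l))
  let trimmed := pvTrimTrail (pvTrimLead raw)
  PySem.Str.strip (PySem.Str.join "\n" (pvLoopA [] 0 trimmed))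

-- ===== PORT B =====

-- the inner `while j < n and (raw[j].strip() truthiness == k)` scan: (run raw[i:j], rest)
def pvRun (k : Bool) : List String → List String × List String
  | [] => ([], [])
  | x :: xs =>
    if pvBlank x == k then
      let p := pvRun k xs
      (x :: p.1, p.2)
    else ([], x :: xs)

theorem pvRun_snd_length (k : Bool) (xs : List String) : (pvRun k xs).2.length ≤ xs.length := by
  induction xs with
  | nil => simp [pvRun]
  | cons x xs ih =>
    simp only [pvRun]
    split
    · exact Nat.le_succ_of_le ih
    · simp

-- the outer `while i < n` loop: emit each run (blank runs capped at two empty lines)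
def pvLoopB : List String → List String
  | [] => []
  | x :: xs =>
    let k := pvBlank x
    let p := pvRun k xs
    (if k then List.replicate (min (p.1.length + 1) 2) "" else x :: p.1) ++ pvLoopB p.2
termination_by xs => xs.length
decreasing_by
  simpa using Nat.lt_succ_of_le (pvRun_snd_length (pvBlank x) xs)

def normalize_doc_py_alt (lines : List String) : String :=
  let raw := lines.map (fun l => PySem.Str.rstrip (if l == "" then "" else l))
  PySem.Str.strip (PySem.Str.join "\n" (pvLoopB raw))

-- ===== PRECONDITION & SPEC =====
def Spec_normalize_doc_py (lines : List String) (out : String) : Prop := out = normalize_doc_py_alt lines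
instance (lines : List String) (out : String) : Decidable (Spec_normalize_doc_py lines out) := by unfold Spec_normalize_doc_py; infer_instance

-- ===== CLAIM (what is proved, stated in full; the proofs are below) =====
def Claim_equal_normalize_doc_py : Prop := ∀ (lines : List String), Dom_normalize_doc_py lines → Spec_normalize_doc_py lines (normalize_doc_py lines)

-- ===== LEMMAS AND PROOFS =====

-- accumulator extraction for A's loop
theorem pvLoopA_out (out : List String) (r : Int) (xs : List String) :
    pvLoopA out r xs = out ++ pvLoopA [] r xs := by
  induction xs generalizing out r with
  | nil => simp [pvLoopA]
  | cons x xs ih =>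
    simp only [pvLoopA]
    split
    · rw [ih, ih (if r + 1 ≤ 2 then [] ++ [""] else [])]
      split <;> simp
    · rw [ih, ih ([] ++ [x])]
      simp

-- a blank run of length |g| emits min |g| (2-r).toNat empty lines and bumps the counter
theorem pvLoopA_blank_run (g rest : List String) (r : Int)
    (hg : ∀ x ∈ g, pvBlank x = true) :
    pvLoopA [] r (g ++ rest) =
      List.replicate (min g.length (2 - r).toNat) "" ++ pvLoopA [] (r + g.length) rest := by
  induction g generalizing r with
  | nil => simp
  | cons b g' ih =>
    have hb : pvBlank b = true := hg b (by simp)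
    simp only [List.cons_append, pvLoopA, hb, if_true]
    rw [pvLoopA_out, ih _ (fun x hx => hg x (by simp [hx]))]
    have hc : r + 1 + (g'.length : Int) = r + ((g'.length : Nat) + 1 : Nat) := by push_cast; ring
    rw [hc]
    have hrep : (if r + 1 ≤ 2 then [] ++ [""] else ([] : List String)) =
        List.replicate (if r + 1 ≤ 2 then 1 else 0) "" := by split <;> simp
    rw [hrep, ← List.append_assoc, ← List.replicate_add]
    congr 2
    simp only [List.length_cons]
    split_ifs <;> omega

-- a non-empty non-blank run is copied verbatim and resets the counter
theorem pvLoopA_nonblank_run (g rest : List String) (r : Int)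
    (hg : ∀ x ∈ g, pvBlank x = false) (hne : g ≠ []) :
    pvLoopA [] r (g ++ rest) = g ++ pvLoopA [] 0 rest := by
  induction g generalizing r with
  | nil => exact absurd rfl hne
  | cons x g' ih =>
    have hx : pvBlank x = false := hg x (by simp)
    simp only [List.cons_append, pvLoopA, hx, Bool.false_eq_true, if_false]
    rw [pvLoopA_out]
    cases g' with
    | nil => simp
    | cons y g'' =>
      rw [ih _ (fun z hz => hg z (by simp [hz])) (by simp)]
      simp

-- the counter is irrelevant when the rest starts non-blank (or is empty)
theorem pvLoopA_reset (rest : List String) (c : Int)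
    (h : rest = [] ∨ ∃ y ys, rest = y :: ys ∧ pvBlank y = false) :
    pvLoopA [] c rest = pvLoopA [] 0 rest := by
  rcases h with h | ⟨y, ys, rfl, hy⟩
  · subst h; rfl
  · simp only [pvLoopA, hy, Bool.false_eq_true, if_false]

theorem pvRun_fst_all (k : Bool) (xs : List String) : ∀ x ∈ (pvRun k xs).1, pvBlank x = k := by
  induction xs with
  | nil => simp [pvRun]
  | cons x xs ih =>
    simp only [pvRun]
    split
    · rename_i h
      intro z hz
      rcases List.mem_cons.mp hz with rfl | hz
      · exact of_decide_eq_true h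
      · exact ih z hz
    · simp

theorem pvRun_append (k : Bool) (xs : List String) : (pvRun k xs).1 ++ (pvRun k xs).2 = xs := by
  induction xs with
  | nil => simp [pvRun]
  | cons x xs ih =>
    simp only [pvRun]
    split
    · simpa using ih
    · simp

theorem pvRun_snd_shape (k : Bool) (xs : List String) :
    (pvRun k xs).2 = [] ∨ ∃ y ys, (pvRun k xs).2 = y :: ys ∧ pvBlank y = !k := by
  induction xs with
  | nil => simp [pvRun]
  | cons x xs ih =>
    simp only [pvRun]
    split
    · exact ih
    · rename_i h
      right
      exact ⟨x, xs, rfl, by cases k <;> cases hx : pvBlank x <;> simp_all⟩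

-- bridge: A's counting loop (no trimming) computes exactly B's run-length pass
theorem pvLoopA_eq_pvLoopB (xs : List String) : pvLoopA [] 0 xs = pvLoopB xs := by
  induction hn : xs.length using Nat.strong_induction_on generalizing xs with
  | _ n ih =>
  cases xs with
  | nil => simp [pvLoopA, pvLoopB]
  | cons x xs =>
    subst hn
    have hsplit := pvRun_append (pvBlank x) xs
    have hall := pvRun_fst_all (pvBlank x) xs
    have hshape := pvRun_snd_shape (pvBlank x) xs
    have hlen : (pvRun (pvBlank x) xs).2.length < (x :: xs).length :=
      Nat.lt_succ_of_le (pvRun_snd_length _ _)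
    have hrest : pvLoopA [] 0 (pvRun (pvBlank x) xs).2 = pvLoopB (pvRun (pvBlank x) xs).2 :=
      ih _ hlen _ rfl
    rw [pvLoopB]
    cases hk : pvBlank x with
    | true =>
      have hshape' : (pvRun true xs).2 = [] ∨
          ∃ y ys, (pvRun true xs).2 = y :: ys ∧ pvBlank y = false := by
        rw [hk] at hshape; simpa using hshape
      rw [hk] at hsplit hall hrest hlen
      conv_lhs => rw [← hsplit]
      rw [show (x :: ((pvRun true xs).1 ++ (pvRun true xs).2)) =
            (x :: (pvRun true xs).1) ++ (pvRun true xs).2 by simp]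
      rw [pvLoopA_blank_run _ _ 0 (by
        intro z hz
        rcases List.mem_cons.mp hz with rfl | hz
        · exact hk
        · exact hall z hz)]
      rw [pvLoopA_reset _ _ (by
        rcases hshape' with h | ⟨y, ys, hy, hb⟩
        · exact Or.inl h
        · exact Or.inr ⟨y, ys, hy, hb⟩)]
      have hmin : min (x :: (pvRun true xs).1).length ((2:Int) - 0).toNat =
          min ((pvRun true xs).1.length + 1) 2 := by
        simp only [List.length_cons]
        omega
      rw [hrest, if_pos rfl, hmin]
    | false =>
      rw [hk] at hsplit hall hrest hlen
      conv_lhs => rw [← hsplit]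
      rw [show (x :: ((pvRun false xs).1 ++ (pvRun false xs).2)) =
            (x :: (pvRun false xs).1) ++ (pvRun false xs).2 by simp]
      rw [pvLoopA_nonblank_run _ _ 0 (by
        intro z hz
        rcases List.mem_cons.mp hz with rfl | hz
        · exact hk
        · exact hall z hz) (by simp)]
      rw [hrest, if_neg (by simp)]

-- ---- string lemmas: strip ∘ join is blind to boundary empty lines ----

theorem pvStrip_cons_nl (l : List Char) : PySem.Chars.strip ('\n' :: l) = PySem.Chars.strip l := by
  have hnl : PySem.Chars.isspace '\n' = true := by decide
  simp [PySem.Chars.strip, PySem.Chars.lstrip, hnl]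

theorem pvStrip_append_nl (l : List Char) : PySem.Chars.strip (l ++ ['\n']) = PySem.Chars.strip l := by
  have hnl : PySem.Chars.isspace '\n' = true := by decide
  simp only [PySem.Chars.strip, PySem.Chars.lstrip, List.dropWhile_append]
  by_cases h : (List.dropWhile PySem.Chars.isspace l).isEmpty
  · rw [if_pos h, List.isEmpty_iff.mp h]
    simp [PySem.Chars.rstrip, hnl]
  · rw [if_neg h]
    simp only [PySem.Chars.rstrip, List.reverse_append]
    simp [hnl]

theorem pvJoin_cons_empty (ys : List String) :
    PySem.Str.strip (PySem.Str.join "\n" ("" :: ys)) = PySem.Str.strip (PySem.Str.join "\n" ys) := by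
  cases ys with
  | nil => rfl
  | cons y ys =>
    simp only [PySem.Str.join, PySem.Str.strip, List.map_cons, String.toList_ofList]
    rw [PySem.Chars.join_cons_cons]
    exact congrArg String.ofList (pvStrip_cons_nl _)

theorem pvJoin_append_empty_ne (ys : List String) (hne : ys ≠ []) :
    PySem.Chars.join (String.toList "\n") ((ys ++ [""]).map String.toList) =
      PySem.Chars.join (String.toList "\n") (ys.map String.toList) ++ ['\n'] := by
  induction ys with
  | nil => exact absurd rfl hne
  | cons y ys ih =>
    cases ys with
    | nil =>
      simp only [List.cons_append, List.nil_append, List.map_cons, List.map_nil,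
        PySem.Chars.join_cons_cons, PySem.Chars.join_singleton]
      simp
    | cons z zs =>
      simp only [List.cons_append, List.map_cons] at *
      rw [PySem.Chars.join_cons_cons, PySem.Chars.join_cons_cons, ih (by simp)]
      simp

theorem pvJoin_snoc_empty (ys : List String) :
    PySem.Str.strip (PySem.Str.join "\n" (ys ++ [""])) = PySem.Str.strip (PySem.Str.join "\n" ys) := by
  cases hys : ys with
  | nil => rfl
  | cons y ys' =>
    rw [← hys]
    simp only [PySem.Str.join, PySem.Str.strip, String.toList_ofList]
    rw [pvJoin_append_empty_ne ys (by simp [hys]), pvStrip_append_nl]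

theorem pvJoin_snoc_replicate (ys : List String) (k : Nat) :
    PySem.Str.strip (PySem.Str.join "\n" (ys ++ List.replicate k "")) =
      PySem.Str.strip (PySem.Str.join "\n" ys) := by
  induction k generalizing ys with
  | zero => simp
  | succ k ih =>
    have : ys ++ List.replicate (k + 1) "" = (ys ++ [""]) ++ List.replicate k "" := by
      rw [List.append_assoc]
      congr 1
    rw [this, ih, pvJoin_snoc_empty]

-- leading-trim redundancy: under the final strip, A's loop ignores leading blank lines
theorem pvLead_irrelevant (xs : List String) (r : Int) :
    PySem.Str.strip (PySem.Str.join "\n" (pvLoopA [] r xs)) =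
      PySem.Str.strip (PySem.Str.join "\n" (pvLoopA [] 0 (xs.dropWhile pvBlank))) := by
  induction xs generalizing r with
  | nil => rfl
  | cons x xs ih =>
    cases hx : pvBlank x with
    | true =>
      have hstep : pvLoopA [] r (x :: xs) =
          (if r + 1 ≤ 2 then [""] else []) ++ pvLoopA [] (r + 1) xs := by
        simp only [pvLoopA, hx, if_true]
        rw [pvLoopA_out]
        split <;> simp
      rw [hstep]
      simp only [List.dropWhile_cons, hx, if_true]
      split
      · rw [List.singleton_append, pvJoin_cons_empty]
        exact ih (r + 1)
      · rw [List.nil_append]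
        exact ih (r + 1)
    | false =>
      simp only [pvLoopA, hx, Bool.false_eq_true, if_false, List.dropWhile_cons]

-- appending blank lines only appends (≤ 2) empty output lines
theorem pvLoopA_append_blanks (zs g : List String) (r : Int)
    (hg : ∀ x ∈ g, pvBlank x = true) :
    ∃ k, pvLoopA [] r (zs ++ g) = pvLoopA [] r zs ++ List.replicate k "" := by
  induction zs generalizing r with
  | nil =>
    refine ⟨min g.length (2 - r).toNat, ?_⟩
    have h := pvLoopA_blank_run g [] r hg
    simp only [List.append_nil] at h
    simpa [pvLoopA] using h
  | cons z zs ih =>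
    simp only [List.cons_append, pvLoopA]
    cases hz : pvBlank z with
    | true =>
      simp only [if_true]
      obtain ⟨k, hk⟩ := ih (r + 1)
      refine ⟨k, ?_⟩
      rw [pvLoopA_out, hk, pvLoopA_out (if r + 1 ≤ 2 then [] ++ [""] else []) (r + 1) zs]
      simp
    | false =>
      simp only [Bool.false_eq_true, if_false]
      obtain ⟨k, hk⟩ := ih 0
      refine ⟨k, ?_⟩
      rw [pvLoopA_out, hk, pvLoopA_out ([] ++ [z]) 0 zs]
      simp

-- trailing-trim redundancy
theorem pvTrail_irrelevant (zs g : List String) (hg : ∀ x ∈ g, pvBlank x = true) :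
    PySem.Str.strip (PySem.Str.join "\n" (pvLoopA [] 0 (zs ++ g))) =
      PySem.Str.strip (PySem.Str.join "\n" (pvLoopA [] 0 zs)) := by
  obtain ⟨k, hk⟩ := pvLoopA_append_blanks zs g 0 hg
  rw [hk, pvJoin_snoc_replicate]

theorem pvTrimLead_eq_dropWhile (xs : List String) : pvTrimLead xs = xs.dropWhile pvBlank := by
  induction xs with
  | nil => rfl
  | cons x xs ih =>
    simp only [pvTrimLead, List.dropWhile_cons]
    split <;> simp_all

-- ===== VERDICT (by name: the statement is the Claim_ definition above) =====
theorem normalize_doc_py_spec : Claim_equal_normalize_doc_py := by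
  intro lines _
  unfold Spec_normalize_doc_py normalize_doc_py normalize_doc_py_alt
  set raw := lines.map (fun l => PySem.Str.rstrip (if l == "" then "" else l)) with hraw
  set t := pvTrimLead raw with ht
  -- decompose t into its non-blank-ending prefix and trailing blank run
  have hdecomp : t = pvTrimTrail t ++ (t.reverse.takeWhile pvBlank).reverse := by
    conv_lhs => rw [← List.reverse_reverse t, ← List.takeWhile_append_dropWhile (p := pvBlank) (l := t.reverse)]
    rw [List.reverse_append]
    simp [pvTrimTrail, pvTrimLead_eq_dropWhile]
  have hblanks : ∀ x ∈ (t.reverse.takeWhile pvBlank).reverse, pvBlank x = true := by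
    intro x hx
    exact List.mem_takeWhile_imp (by simpa using hx)
  calc PySem.Str.strip (PySem.Str.join "\n" (pvLoopA [] 0 (pvTrimTrail t)))
      = PySem.Str.strip (PySem.Str.join "\n" (pvLoopA [] 0 t)) := by
        conv_rhs => rw [hdecomp]
        rw [pvTrail_irrelevant _ _ hblanks]
    _ = PySem.Str.strip (PySem.Str.join "\n" (pvLoopA [] 0 raw)) := by
        rw [ht, pvTrimLead_eq_dropWhile]
        exact (pvLead_irrelevant raw 0).symm
    _ = PySem.Str.strip (PySem.Str.join "\n" (pvLoopB raw)) := by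
        rw [pvLoopA_eq_pvLoopB]
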